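-- pv_equiv track=rewrite | github.com/Qiskit/qiskit | qiskit/transpiler/passes/extension_mapper/src/mapping/size.py | matching_sets
-- ===== SOURCE A (Python) =====
-- import itertools
-- import typing
-- from typing import Dict, Set, Callable, Iterable, Mapping, TypeVar, List, Generic, Tuple, \
--     Iterator, Optional
--
-- ArchNode = TypeVar('ArchNode')
--
-- def matching_sets(edges: Iterable[Tuple[ArchNode, ArchNode]], size: int) \
--         -> Iterator[List[Tuple[ArchNode, ArchNode]]]:
--     """Compute all sets of edges that are a matching of the given size."""
--
--     def is_matching(edges: Iterable[Tuple]) -> bool: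
--         """Checks if the nodes of the matching are unique"""
--         nodes = [node for edge in edges for node in edge]
--         return len(set(nodes)) == len(nodes)
--
--     matchings_edges: Iterator[Tuple[Tuple[ArchNode, ArchNode], ...]] = \
--         (permutation_edges for permutation_edges in itertools.permutations(edges, size)
--          if is_matching(permutation_edges))
--     # Now also generate all possible subsets with edges reversed.
--     for matching_edges in matchings_edges:
--         # Pick edges to reverse
--         reversed_edge_indices = (set(index)
--                                  for i in range(len(matching_edges) + 1)
--                                  for index in
--                                  itertools.combinations(range(len(matching_edges)), i))
--         for index in reversed_edge_indices:
--             yield [typing.cast(Tuple[ArchNode, ArchNode], tuple(reversed(edge)))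
--                    if i in index else edge
--                    for i, edge in enumerate(matching_edges)]
-- ===== SOURCE B (Python) =====
-- def matching_sets(edges, size):
--     """Compute all sets of edges that are a matching of the given size.
--
--     Backtracking DFS: extend a partial matching edge by edge, keeping the set of
--     used nodes, so conflicting permutations are pruned instead of generated and
--     filtered; reversal variants are produced by a direct recursion on the edge
--     list instead of enumerating index combinations.
--     """
--     edges = list(edges)
--
--     def rev_variants(lst, r):
--         # all variants of lst with exactly r edges reversed, positions lexicographic
--         if r == 0:
--             yield lst
--         elif not lst:
--             return
--         else:
--             (u, v), rest = lst[0], lst[1:]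
--             for x in rev_variants(rest, r - 1):
--                 yield [(v, u)] + x
--             for x in rev_variants(rest, r):
--                 yield [(u, v)] + x
--
--     def dfs(prefix, remaining, used):
--         if len(prefix) == size:
--             for r in range(len(prefix) + 1):
--                 yield from rev_variants(prefix, r)
--         else:
--             for j, (u, v) in enumerate(remaining):
--                 if u != v and u not in used and v not in used:
--                     yield from dfs(prefix + [(u, v)],
--                                    remaining[:j] + remaining[j + 1:],
--                                    used | {u, v})
--
--     yield from dfs([], edges, set())
-- ===== Notes on version B (the rewrite author's own statement) =====
-- stated objective: alternative
-- what changed: Instead of generating all size-k permutations of the edges and filtering each with a full is_matching scan, B grows matchings by a backtracking DFS with an incremental used-node set (conflicting branches are pruned as soon as an edge clashes), and produces the reversal variants by direct recursion on the edge list instead of enumerating index combinations and re-scanning with enumerate/membership.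
-- crash fix: For size < 0 A raises ValueError (itertools.permutations with negative r) while B returns []. — e.g. on matching_sets([(0, 1)], -1): A raises ValueError, B returns []
import Mathlib
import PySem

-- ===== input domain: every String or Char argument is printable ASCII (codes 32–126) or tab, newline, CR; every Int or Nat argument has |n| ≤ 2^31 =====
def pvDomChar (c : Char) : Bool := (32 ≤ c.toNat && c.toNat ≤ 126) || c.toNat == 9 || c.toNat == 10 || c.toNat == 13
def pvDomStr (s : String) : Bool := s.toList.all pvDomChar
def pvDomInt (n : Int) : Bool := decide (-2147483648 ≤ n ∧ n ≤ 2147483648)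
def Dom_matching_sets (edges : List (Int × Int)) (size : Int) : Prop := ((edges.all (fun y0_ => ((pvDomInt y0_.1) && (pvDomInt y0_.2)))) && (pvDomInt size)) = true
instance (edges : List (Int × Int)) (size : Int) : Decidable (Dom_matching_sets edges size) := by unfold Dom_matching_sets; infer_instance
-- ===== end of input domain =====

-- B replaces A's generate-all-permutations-then-filter strategy by a pruned backtracking DFS
-- with an incremental used-node set, and builds the reversal variants by direct recursion on
-- the edge list instead of enumerating index combinations (objective: alternative).
-- Both versions are generators in Python; the equivalence is about the produced list of values.

-- ===== PORT A =====
-- A's nested helper `is_matching`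
def pvIsMatching (es : List (Int × Int)) : Bool :=
  let nodes := es.flatMap (fun edge => [edge.1, edge.2])
  PySem.Set.len (PySem.Set.ofList nodes) == (nodes.length : Int)

-- the body of A's outer `for matching_edges in matchings_edges` loop: all reversal
-- variants of one matching, index subsets ordered by size then lexicographically
-- (the loop variable `i` of `range(len(...)+1)` is nonnegative, so a Nat range is exact here)
def pvYieldVariants (m : List (Int × Int)) : List (List (Int × Int)) :=
  (List.range (m.length + 1)).flatMap (fun i =>
    (PySem.List.combinations (PySem.List.pyRange 0 (m.length : Int)) i).map (fun index =>
      (PySem.List.enumerate m).map (fun p =>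
        if (PySem.Set.ofList index).contains p.1 then (p.2.2, p.2.1) else p.2)))

-- Pre_ below excludes size < 0 (where Python's permutations raises ValueError), so `size.toNat` is exact
def matching_sets (edges : List (Int × Int)) (size : Int) : List (List (Int × Int)) :=
  ((PySem.List.permutations edges size.toNat).filter pvIsMatching).flatMap pvYieldVariants

-- ===== PORT B =====
-- B's helper `rev_variants`
def pvRevVariants : List (Int × Int) → Nat → List (List (Int × Int))
  | lst, 0 => [lst]
  | [], _ + 1 => []
  | (u, v) :: rest, r + 1 =>
      (pvRevVariants rest r).map (fun x => (v, u) :: x) ++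
      (pvRevVariants rest (r + 1)).map (fun x => (u, v) :: x)
termination_by structural lst => lst

-- B's `dfs`; `fuel` only makes the recursion structural — it is started above the
-- recursion depth (remaining.length + 1) and never runs out
def pvDfs (size : Int) : Nat → List (Int × Int) → List (Int × Int) → PySem.Set Int → List (List (Int × Int))
  | 0, _, _, _ => []
  | fuel + 1, pre, remaining, used =>
    if (pre.length : Int) == size then
      (List.range (pre.length + 1)).flatMap (fun r => pvRevVariants pre r)
    else
      (PySem.List.enumerate remaining).flatMap (fun q =>
        if q.2.1 != q.2.2 && !(used.contains q.2.1) && !(used.contains q.2.2) then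
          pvDfs size fuel (pre ++ [q.2])
            (PySem.List.slice remaining none (some q.1) ++
              PySem.List.slice remaining (some (q.1 + 1)) none)
            ((used.add q.2.1).add q.2.2)
        else [])

def matching_sets_alt (edges : List (Int × Int)) (size : Int) : List (List (Int × Int)) :=
  pvDfs size (edges.length + 1) [] edges PySem.Set.empty

-- ===== PRECONDITION & SPEC =====
-- Pre_ excludes size < 0, where A raises ValueError (itertools.permutations with negative r)
def Pre_matching_sets (edges : List (Int × Int)) (size : Int) : Prop := 0 ≤ size
instance (edges : List (Int × Int)) (size : Int) : Decidable (Pre_matching_sets edges size) := by unfold Pre_matching_sets; infer_instance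
def pvWitness_matching_sets : (List (Int × Int)) × Int := ([(0, 1), (2, 3)], 1)

-- For size < 0 A raises ValueError while B returns []
def Raises_matching_sets (edges : List (Int × Int)) (size : Int) : Prop := size < 0
instance (edges : List (Int × Int)) (size : Int) : Decidable (Raises_matching_sets edges size) := by unfold Raises_matching_sets; infer_instance
def pvRaiseWitness_matching_sets : (List (Int × Int)) × Int := ([(0, 1)], -1)
def pvRaiseWitnessOut_matching_sets : List (List (Int × Int)) := []

def Spec_matching_sets (edges : List (Int × Int)) (size : Int) (out : List (List (Int × Int))) : Prop := out = matching_sets_alt edges size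
instance (edges : List (Int × Int)) (size : Int) (out : List (List (Int × Int))) : Decidable (Spec_matching_sets edges size out) := by unfold Spec_matching_sets; infer_instance

-- ===== CLAIM (what is proved, stated in full; the proofs are below) =====
def Claim_equal_matching_sets : Prop := ∀ (edges : List (Int × Int)) (size : Int), Dom_matching_sets edges size → Pre_matching_sets edges size → Spec_matching_sets edges size (matching_sets edges size)
def Claim_raises_matching_sets : Prop := (∀ (edges : List (Int × Int)) (size : Int), Dom_matching_sets edges size → Raises_matching_sets edges size → ¬ Pre_matching_sets edges size) ∧ (Dom_matching_sets (pvRaiseWitness_matching_sets.1) (pvRaiseWitness_matching_sets.2) ∧ Raises_matching_sets (pvRaiseWitness_matching_sets.1) (pvRaiseWitness_matching_sets.2) ∧ matching_sets_alt (pvRaiseWitness_matching_sets.1) (pvRaiseWitness_matching_sets.2) = pvRaiseWitnessOut_matching_sets)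

-- ===== LEMMAS AND PROOFS =====

-- the node list of a list of edges (the value A's is_matching deduplicates)
def pvNodes (es : List (Int × Int)) : List Int := es.flatMap (fun edge => [edge.1, edge.2])

theorem pvNodes_append (a b : List (Int × Int)) : pvNodes (a ++ b) = pvNodes a ++ pvNodes b := by
  simp [pvNodes]


theorem pvContains_iff (s : PySem.Set Int) (x : Int) : (s.contains x = true) ↔ x ∈ s := by
  simp [PySem.Set.contains]

theorem pvIsMatching_iff (es : List (Int × Int)) : pvIsMatching es = true ↔ (pvNodes es).Nodup := by
  have hiff : (PySem.Set.ofList (pvNodes es)).length = (pvNodes es).length ↔ (pvNodes es).Nodup := by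
    constructor
    · intro h
      have h1 : (PySem.Set.ofList (pvNodes es)).toFinset = (pvNodes es).toFinset := by
        ext x; simp [PySem.Set.mem_ofList]
      have h2 : (PySem.Set.ofList (pvNodes es)).toFinset.card = (PySem.Set.ofList (pvNodes es)).length :=
        List.toFinset_card_of_nodup (PySem.Set.nodup_ofList _)
      have h3 : (pvNodes es).dedup.length = (pvNodes es).length := by
        rw [← List.card_toFinset, ← h1, h2, h]
      have h4 : (pvNodes es).dedup = pvNodes es :=
        (List.dedup_sublist _).eq_of_length h3
      exact List.dedup_eq_self.mp h4
    · intro h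
      rw [PySem.Set.ofList_eq_self_of_nodup _ h]
  have : pvIsMatching es = true ↔ (PySem.Set.ofList (pvNodes es)).length = (pvNodes es).length := by
    simp [pvIsMatching, pvNodes, PySem.Set.len]
    omega
  rw [this, hiff]

theorem pvIsMatching_false_of_ext (a t : List (Int × Int)) (h : ¬ (pvNodes a).Nodup) :
    pvIsMatching (a ++ t) = false := by
  rw [← Bool.not_eq_true]
  intro hm
  exact h (((pvNodes_append a t) ▸ (pvIsMatching_iff (a ++ t)).mp hm).of_append_left)

theorem pvRev_eq (m : List (Int × Int)) (s : Int) (r : Nat) :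
    (PySem.List.combinations (PySem.List.pyRange s (s + m.length)) r).map
      (fun index => (PySem.List.enumerate m s).map (fun p =>
        if (PySem.Set.ofList index).contains p.1 then (p.2.2, p.2.1) else p.2))
    = pvRevVariants m r := by
  induction m generalizing s r with
  | nil =>
    have hnil : PySem.List.pyRange s (s + ([] : List (Int × Int)).length) = [] := by
      rw [List.eq_nil_iff_forall_not_mem]
      intro x hx
      have := PySem.List.mem_pyRange_one.mp hx
      simp at this
      omega
    cases r with
    | zero =>
      simp [PySem.List.combinations_zero, pvRevVariants]
    | succ r =>
      rw [hnil]
      simp [PySem.List.combinations_nil_succ, pvRevVariants]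
  | cons e m ih =>
    obtain ⟨u, v⟩ := e
    cases r with
    | zero =>
      simp only [PySem.List.combinations_zero, List.map_cons, List.map_nil]
      have : (PySem.List.enumerate ((u, v) :: m) s).map (fun p =>
          if (PySem.Set.ofList ([] : List Int)).contains p.1 then (p.2.2, p.2.1) else p.2)
          = (u, v) :: m := by
        have hc : ∀ x : Int, (PySem.Set.ofList ([] : List Int)).contains x = false := by
          intro x; rfl
        simp only [hc, Bool.false_eq_true, if_false]
        exact PySem.List.map_snd_enumerate _ _
      rw [this]
      rfl
    | succ r =>
      have hb : (s + ((((u, v) :: m).length : Nat) : Int)) = (s + 1) + ((m.length : Nat) : Int) := by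
        simp only [List.length_cons]
        push_cast
        ring
      have hcons : PySem.List.pyRange s (s + ((((u, v) :: m).length : Nat) : Int)) =
          s :: PySem.List.pyRange (s + 1) ((s + 1) + ((m.length : Nat) : Int)) := by
        rw [hb, PySem.List.pyRange_one_cons (by omega)]
      rw [hcons, PySem.List.combinations_cons_succ, List.map_append, List.map_map]
      simp only [Function.comp_def]
      have hmemenum : ∀ p ∈ PySem.List.enumerate m (s + 1), p.1 ≠ s := by
        intro p hp
        obtain ⟨k, hk, rfl⟩ := (PySem.List.mem_enumerate_iff m (s + 1) p).mp hp
        simp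
        omega
      have hfirst : ∀ idx : List Int,
          (PySem.List.enumerate ((u, v) :: m) s).map (fun p =>
            if (PySem.Set.ofList (s :: idx)).contains p.1 then (p.2.2, p.2.1) else p.2)
          = (v, u) :: (PySem.List.enumerate m (s + 1)).map (fun p =>
            if (PySem.Set.ofList idx).contains p.1 then (p.2.2, p.2.1) else p.2) := by
        intro idx
        rw [PySem.List.enumerate_cons, List.map_cons]
        congr 1
        · simp
        · apply List.map_congr_left
          intro p hp
          have hne := hmemenum p hp
          simp [hne]
      have hsecond : ∀ idx ∈ PySem.List.combinations
          (PySem.List.pyRange (s + 1) ((s + 1) + ((m.length : Nat) : Int))) (r + 1),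
          (PySem.List.enumerate ((u, v) :: m) s).map (fun p =>
            if (PySem.Set.ofList idx).contains p.1 then (p.2.2, p.2.1) else p.2)
          = (u, v) :: (PySem.List.enumerate m (s + 1)).map (fun p =>
            if (PySem.Set.ofList idx).contains p.1 then (p.2.2, p.2.1) else p.2) := by
        intro idx hidx
        rw [PySem.List.enumerate_cons, List.map_cons]
        congr 1
        have hs : s ∉ idx := by
          intro hmem
          have hsub := (PySem.List.sublist_of_mem_combinations hidx).subset hmem
          have := PySem.List.mem_pyRange_one.mp hsub
          omega
        simp [hs]
      rw [show pvRevVariants ((u, v) :: m) (r + 1)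
          = (pvRevVariants m r).map (fun x => (v, u) :: x)
            ++ (pvRevVariants m (r + 1)).map (fun x => (u, v) :: x) from rfl]
      congr 1
      · rw [List.map_congr_left (fun idx _ => hfirst idx), ← ih (s + 1) r, List.map_map]
        rfl
      · rw [List.map_congr_left hsecond, ← ih (s + 1) (r + 1), List.map_map]
        rfl

theorem pvYieldVariants_eq (m : List (Int × Int)) :
    pvYieldVariants m = (List.range (m.length + 1)).flatMap (fun r => pvRevVariants m r) := by
  unfold pvYieldVariants
  apply List.flatMap_congr
  intro i _
  have := pvRev_eq m 0 i
  simpa using this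

-- proof-side view of B's loop: all ways to pick one element of a list, with the rest
def pvRemovals {α : Type} : List α → List (α × List α)
  | [] => []
  | head :: rest => (head, rest) :: (pvRemovals rest).map (fun p => (p.1, head :: p.2))

theorem pvRemovals_flatMap {α β : Type} (xs : List α) (g : α → List α → List β) :
    (List.range xs.length).flatMap (fun i =>
      match xs[i]? with
      | none => []
      | some e => g e (xs.eraseIdx i))
    = (pvRemovals xs).flatMap (fun p => g p.1 p.2) := by
  induction xs generalizing g with
  | nil => simp [pvRemovals]
  | cons x xs ih =>
    have hlen : (x :: xs).length = xs.length + 1 := rfl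
    rw [hlen, List.range_succ_eq_map, List.flatMap_cons, List.flatMap_map]
    have htail : (fun i => match (x :: xs)[i.succ]? with
        | none => ([] : List β)
        | some e => g e ((x :: xs).eraseIdx i.succ))
        = (fun i => match xs[i]? with
        | none => ([] : List β)
        | some e => (fun e r => g e (x :: r)) e (xs.eraseIdx i)) := by
      funext i
      simp [List.getElem?_cons_succ, List.eraseIdx_cons_succ]
    rw [htail, ih (fun e r => g e (x :: r))]
    simp [pvRemovals, List.flatMap_cons, List.flatMap_map]

theorem permutations_eq_removals {α : Type} (xs : List α) (r : Nat) :
    PySem.List.permutations xs (r + 1)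
    = (pvRemovals xs).flatMap (fun p => (PySem.List.permutations p.2 r).map (fun t => p.1 :: t)) := by
  rw [PySem.List.permutations_succ]
  exact pvRemovals_flatMap xs (fun e rest => (PySem.List.permutations rest r).map (fun t => e :: t))

theorem enumerate_slice_flatMap {β : Type} (xs : List (Int × Int))
    (g : (Int × Int) → List (Int × Int) → List β) :
    (PySem.List.enumerate xs).flatMap (fun q =>
      g q.2 (PySem.List.slice xs none (some q.1) ++ PySem.List.slice xs (some (q.1 + 1)) none))
    = (pvRemovals xs).flatMap (fun p => g p.1 p.2) := by
  rw [PySem.List.enumerate_eq_map_pyRange xs (0, 0), List.flatMap_map]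
  rw [show PySem.List.len xs = ((xs.length : Nat) : Int) from rfl]
  rw [PySem.List.pyRange_zero_nat, List.flatMap_map]
  rw [← pvRemovals_flatMap xs g]
  apply List.flatMap_congr
  intro i hi
  have hilen : i < xs.length := List.mem_range.mp hi
  rw [List.getElem?_eq_getElem hilen]
  rw [PySem.List.pyGetD_natCast, PySem.List.slice_to_natCast,
    show ((i : Nat) : Int) + 1 = (((i + 1 : Nat) : Nat) : Int) by push_cast; ring,
    PySem.List.slice_from_natCast, ← List.eraseIdx_eq_take_drop_succ]
  rw [List.getD_eq_getElem?_getD, List.getElem?_eq_getElem hilen]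
  rfl

theorem pvRemovals_length {α : Type} (xs : List α) (p : α × List α) (h : p ∈ pvRemovals xs) :
    p.2.length + 1 = xs.length := by
  induction xs generalizing p with
  | nil => simp [pvRemovals] at h
  | cons x xs ih =>
    simp only [pvRemovals, List.mem_cons, List.mem_map] at h
    rcases h with rfl | ⟨q, hq, rfl⟩
    · rfl
    · have := ih q hq
      simp
      omega

theorem pvDfs_eq (size : Int) : ∀ (fuel : Nat) (pre rem : List (Int × Int)) (used : PySem.Set Int),
    rem.length < fuel → (pre.length : Int) ≤ size →
    (pvNodes pre).Nodup →
    (∀ x : Int, used.contains x = true ↔ x ∈ pvNodes pre) →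
    pvDfs size fuel pre rem used =
      ((PySem.List.permutations rem (size - pre.length).toNat).filter
        (fun t => pvIsMatching (pre ++ t))).flatMap (fun t => pvYieldVariants (pre ++ t)) := by
  intro fuel
  induction fuel with
  | zero =>
    intro pre rem used hfuel hle hnd hused
    omega
  | succ fuel ih =>
    intro pre rem used hfuel hle hnd hused
    rw [show pvDfs size (fuel + 1) pre rem used =
        (if (pre.length : Int) == size then
          (List.range (pre.length + 1)).flatMap (fun r => pvRevVariants pre r)
        else
          (PySem.List.enumerate rem).flatMap (fun q =>
            if q.2.1 != q.2.2 && !(used.contains q.2.1) && !(used.contains q.2.2) then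
              pvDfs size fuel (pre ++ [q.2])
                (PySem.List.slice rem none (some q.1) ++
                  PySem.List.slice rem (some (q.1 + 1)) none)
                ((used.add q.2.1).add q.2.2)
            else [])) from rfl]
    by_cases hbeq : (pre.length : Int) = size
    · rw [if_pos (by simpa using hbeq)]
      have h0 : (size - (pre.length : Int)).toNat = 0 := by omega
      rw [h0, PySem.List.permutations_zero]
      have hP : pvIsMatching pre = true := (pvIsMatching_iff pre).mpr hnd
      rw [show ([[]] : List (List (Int × Int))).filter (fun t => pvIsMatching (pre ++ t)) = [[]]
        by simp [hP]]
      rw [show ([[]] : List (List (Int × Int))).flatMap (fun t => pvYieldVariants (pre ++ t))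
        = pvYieldVariants pre by
          simp only [List.flatMap_cons, List.flatMap_nil, List.append_nil]]
      rw [pvYieldVariants_eq]
    · rw [if_neg (by simpa using hbeq)]
      rw [enumerate_slice_flatMap rem (fun e rest =>
        if e.1 != e.2 && !(used.contains e.1) && !(used.contains e.2) then
          pvDfs size fuel (pre ++ [e]) rest ((used.add e.1).add e.2)
        else [])]
      have hlt : (pre.length : Int) < size := lt_of_le_of_ne hle hbeq
      have hk : (size - (pre.length : Int)).toNat = (size - ((pre.length : Int) + 1)).toNat + 1 := by
        omega
      rw [hk, permutations_eq_removals, List.filter_flatMap, List.flatMap_assoc]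
      apply List.flatMap_congr
      intro q hq
      have hqlen := pvRemovals_length rem q hq
      rw [List.filter_map, List.flatMap_map]
      simp only [Function.comp_def]
      have hrw1 : (fun t : List (Int × Int) => pvIsMatching (pre ++ q.1 :: t))
          = (fun t => pvIsMatching ((pre ++ [q.1]) ++ t)) :=
        funext fun t => by rw [List.append_cons]
      have hrw2 : (fun t : List (Int × Int) => pvYieldVariants (pre ++ q.1 :: t))
          = (fun t => pvYieldVariants ((pre ++ [q.1]) ++ t)) :=
        funext fun t => by rw [List.append_cons]
      rw [hrw1, hrw2]
      have hnodes : pvNodes (pre ++ [q.1]) = pvNodes pre ++ [q.1.1, q.1.2] := by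
        rw [pvNodes_append]; rfl
      by_cases hc : (q.1.1 != q.1.2 && !(used.contains q.1.1) && !(used.contains q.1.2)) = true
      · rw [if_pos hc]
        simp only [Bool.and_eq_true, bne_iff_ne, Bool.not_eq_true'] at hc
        obtain ⟨⟨hne, hu1⟩, hu2⟩ := hc
        have hn1 : q.1.1 ∉ pvNodes pre := fun hm => by
          have h := (hused q.1.1).mpr hm
          rw [hu1] at h
          exact Bool.false_ne_true h
        have hn2 : q.1.2 ∉ pvNodes pre := fun hm => by
          have h := (hused q.1.2).mpr hm
          rw [hu2] at h
          exact Bool.false_ne_true h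
        have hnd' : (pvNodes (pre ++ [q.1])).Nodup := by
          rw [hnodes, List.nodup_append]
          refine ⟨hnd, by simp [hne], ?_⟩
          intro a ha1 b hb
          rcases List.mem_cons.mp hb with rfl | hb'
          · exact fun h => hn1 (h ▸ ha1)
          · rcases List.mem_cons.mp hb' with rfl | hb''
            · exact fun h => hn2 (h ▸ ha1)
            · simp at hb''
        have hused' : ∀ x : Int,
            ((used.add q.1.1).add q.1.2).contains x = true ↔ x ∈ pvNodes (pre ++ [q.1]) := by
          intro x
          rw [pvContains_iff, PySem.Set.mem_add, PySem.Set.mem_add, hnodes]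
          rw [show (x ∈ used) = (used.contains x = true) from (propext (pvContains_iff used x)).symm,
            hused x]
          simp only [List.mem_append, List.mem_cons, List.not_mem_nil, or_false]
          tauto
        have hflen : q.2.length < fuel := by omega
        have hle' : (((pre ++ [q.1]).length : Nat) : Int) ≤ size := by
          simp only [List.length_append, List.length_cons, List.length_nil]
          push_cast
          omega
        rw [ih (pre ++ [q.1]) q.2 ((used.add q.1.1).add q.1.2) hflen hle' hnd' hused']
        have hlen2 : (size - (((pre ++ [q.1]).length : Nat) : Int)).toNat
            = (size - ((pre.length : Int) + 1)).toNat := by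
          simp only [List.length_append, List.length_cons, List.length_nil]
          push_cast
          ring_nf
        rw [hlen2]
      · rw [if_neg hc]
        have hndfalse : ¬ (pvNodes (pre ++ [q.1])).Nodup := by
          intro hnodup
          rw [hnodes, List.nodup_append] at hnodup
          obtain ⟨h1, h2, h3⟩ := hnodup
          apply hc
          have c0 : q.1.1 ≠ q.1.2 := by simpa using h2
          have cu : q.1.1 ∉ pvNodes pre := fun hm => h3 q.1.1 hm q.1.1 (by simp) rfl
          have cv : q.1.2 ∉ pvNodes pre := fun hm => h3 q.1.2 hm q.1.2 (by simp) rfl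
          have c1 : used.contains q.1.1 = false := by
            rw [← Bool.not_eq_true, hused]
            exact cu
          have c2 : used.contains q.1.2 = false := by
            rw [← Bool.not_eq_true, hused]
            exact cv
          simp only [Bool.and_eq_true, bne_iff_ne, Bool.not_eq_true']
          exact ⟨⟨c0, c1⟩, c2⟩
        have hfilter : (PySem.List.permutations q.2 ((size - ((pre.length : Int) + 1)).toNat)).filter
            (fun t => pvIsMatching ((pre ++ [q.1]) ++ t)) = [] := by
          apply List.filter_eq_nil_iff.mpr
          intro t _
          rw [pvIsMatching_false_of_ext (pre ++ [q.1]) t hndfalse]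
          simp
        rw [hfilter]
        simp

-- ===== VERDICT (by name: the statement is the Claim_ definition above) =====
theorem matching_sets_spec : Claim_equal_matching_sets := by
  intro edges size _ hpre
  unfold Spec_matching_sets matching_sets matching_sets_alt
  rw [pvDfs_eq size (edges.length + 1) [] edges PySem.Set.empty
        (by omega) (by simpa using hpre) (by simp [pvNodes])
        (by intro x; simp [pvNodes, PySem.Set.empty, PySem.Set.contains])]
  simp

@[simp] theorem matching_sets_raises : Claim_raises_matching_sets := by
  unfold Claim_raises_matching_sets
  constructor
  · intro edges size _ hr hp
    exact absurd hp (by unfold Pre_matching_sets Raises_matching_sets at *; omega)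
  · exact ⟨by decide, by decide, by decide⟩
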